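-- pv_equiv track=rewrite | github.com/hemamalinie53-a11y/water | pages/5_🗺️_Map.py | make_marker_color
-- ===== SOURCE A (Python) =====
-- def make_marker_color(samples: list) -> str:
--     """Return folium color string based on sample results."""
--     results  = [s.get('prediction_result', '') for s in samples]
--     all_safe = all(r == 'Safe' for r in results)
--     any_cont = any(r == 'Contaminated' for r in results)
--     if all_safe:
--         return 'green'
--     elif any_cont:
--         return 'red'
--     return 'orange'
-- ===== SOURCE B (Python) =====
-- SEVERITY = {'green': 0, 'orange': 1, 'red': 2}
--
--
-- def _sample_color(s):
--     """Color of a single sample marker."""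
--     r = s.get('prediction_result', '')
--     if r == 'Safe':
--         return 'green'
--     if r == 'Contaminated':
--         return 'red'
--     return 'orange'
--
--
-- def make_marker_color(samples: list) -> str:
--     """Return folium color string based on sample results."""
--     worst = 'green'
--     for s in samples:
--         c = _sample_color(s)
--         if SEVERITY[c] > SEVERITY[worst]:
--             worst = c
--     return worst
-- ===== Notes on version B (the rewrite author's own statement) =====
-- stated objective: alternative
-- what changed: B assigns each sample its own marker color (Safe->green, Contaminated->red, other->orange) and returns the most severe color in one fold under a severity ranking, instead of A's building the result list and running two separate all()/any() scans with a branch chain.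
import Mathlib
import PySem

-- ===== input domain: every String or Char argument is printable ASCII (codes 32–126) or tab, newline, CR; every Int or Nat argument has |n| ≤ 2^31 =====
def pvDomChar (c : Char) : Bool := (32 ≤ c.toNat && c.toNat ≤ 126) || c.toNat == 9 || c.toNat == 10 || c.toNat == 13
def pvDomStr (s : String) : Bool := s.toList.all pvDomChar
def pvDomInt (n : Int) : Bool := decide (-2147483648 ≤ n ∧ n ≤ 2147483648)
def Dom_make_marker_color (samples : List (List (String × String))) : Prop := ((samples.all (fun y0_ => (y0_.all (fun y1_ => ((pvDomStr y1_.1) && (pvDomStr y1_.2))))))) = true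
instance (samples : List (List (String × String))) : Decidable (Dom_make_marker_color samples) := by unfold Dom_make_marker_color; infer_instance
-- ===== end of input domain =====

-- B gives each sample its own color (Safe->green, Contaminated->red, else orange) and
-- folds to the most severe one under a ranking, instead of A's two all()/any() scans (alternative).


-- ===== PORT A =====
def make_marker_color (samples : List (List (String × String))) : String :=
  let results := samples.map (fun s => (PySem.Dict.mk s).getD "prediction_result" "")
  let all_safe := results.all (fun r => r == "Safe")
  let any_cont := results.any (fun r => r == "Contaminated")
  if all_safe then "green"
  else if any_cont then "red"
  else "orange"

-- ===== PORT B =====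
-- SEVERITY[c]: the dict lookup is only reached with the three color keys, which are always
-- present, so getD (default never used) is exact for Python's SEVERITY[c].
def pvSEVERITY : PySem.Dict String Int := PySem.Dict.mk [("green", 0), ("orange", 1), ("red", 2)]

def pvSampleColor (s : List (String × String)) : String :=
  let r := (PySem.Dict.mk s).getD "prediction_result" ""
  if r == "Safe" then "green"
  else if r == "Contaminated" then "red"
  else "orange"

def make_marker_color_alt (samples : List (List (String × String))) : String :=
  samples.foldl
    (fun worst s =>
      let c := pvSampleColor s
      if pvSEVERITY.getD worst 0 < pvSEVERITY.getD c 0 then c else worst)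
    "green"

-- ===== PRECONDITION & SPEC =====
def Spec_make_marker_color (samples : List (List (String × String))) (out : String) : Prop := out = make_marker_color_alt samples
instance (samples : List (List (String × String))) (out : String) : Decidable (Spec_make_marker_color samples out) := by unfold Spec_make_marker_color; infer_instance

-- ===== CLAIM (what is proved, stated in full; the proofs are below) =====
def Claim_equal_make_marker_color : Prop := ∀ (samples : List (List (String × String))), Dom_make_marker_color samples → Spec_make_marker_color samples (make_marker_color samples)

-- ===== LEMMAS AND PROOFS =====

-- abbreviations for the proofs
def pvPred (s : List (String × String)) : String := (PySem.Dict.mk s).getD "prediction_result" ""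

def pvStep (worst : String) (s : List (String × String)) : String :=
  let c := pvSampleColor s
  if pvSEVERITY.getD worst 0 < pvSEVERITY.getD c 0 then c else worst

-- the loop body as a function of the accumulator and the predicted string
def pvAux (w r : String) : String :=
  let c := if r == "Safe" then "green" else if r == "Contaminated" then "red" else "orange"
  if pvSEVERITY.getD w 0 < pvSEVERITY.getD c 0 then c else w

lemma step_val (w : String) (s : List (String × String)) : pvStep w s = pvAux w (pvPred s) := rfl

lemma alt_eq_foldl (samples : List (List (String × String))) :
    make_marker_color_alt samples = samples.foldl pvStep "green" := rfl

lemma aux_other (w r : String) (h1 : r ≠ "Safe") (h2 : r ≠ "Contaminated") :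
    pvAux w r = pvAux w "other" := by
  unfold pvAux
  simp [h1, h2]

-- once the accumulator is "red" it stays "red"
lemma loop_red (ss : List (List (String × String))) : ss.foldl pvStep "red" = "red" := by
  induction ss with
  | nil => rfl
  | cons s ss ih =>
    have hstep : pvStep "red" s = "red" := by
      rw [step_val]
      by_cases h1 : pvPred s = "Safe"
      · rw [h1]; decide
      · by_cases h2 : pvPred s = "Contaminated"
        · rw [h2]; decide
        · rw [aux_other _ _ h1 h2]; decide
    simp [List.foldl, hstep, ih]

-- from "orange" the loop returns "red" iff some remaining sample is contaminated
lemma loop_orange (ss : List (List (String × String))) :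
    ss.foldl pvStep "orange" =
      (if ss.any (fun s => pvPred s == "Contaminated") then "red" else "orange") := by
  induction ss with
  | nil => rfl
  | cons s ss ih =>
    by_cases h2 : pvPred s = "Contaminated"
    · have hstep : pvStep "orange" s = "red" := by rw [step_val, h2]; decide
      simp [List.foldl, hstep, loop_red, h2]
    · have hstep : pvStep "orange" s = "orange" := by
        rw [step_val]
        by_cases h1 : pvPred s = "Safe"
        · rw [h1]; decide
        · rw [aux_other _ _ h1 h2]; decide
      simp [List.foldl, hstep, ih, h2]

-- from "green" the loop computes exactly A's branch chain
lemma loop_green (ss : List (List (String × String))) :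
    ss.foldl pvStep "green" =
      (if ss.all (fun s => pvPred s == "Safe") then "green"
       else if ss.any (fun s => pvPred s == "Contaminated") then "red" else "orange") := by
  induction ss with
  | nil => rfl
  | cons s ss ih =>
    by_cases h1 : pvPred s = "Safe"
    · have hstep : pvStep "green" s = "green" := by rw [step_val, h1]; decide
      simp [List.foldl, hstep, ih, h1]
    · by_cases h2 : pvPred s = "Contaminated"
      · have hstep : pvStep "green" s = "red" := by rw [step_val, h2]; decide
        simp [List.foldl, hstep, loop_red, h2]
      · have hstep : pvStep "green" s = "orange" := by
          rw [step_val, aux_other _ _ h1 h2]; decide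
        simp [List.foldl, hstep, loop_orange, h1, h2]

-- ===== VERDICT (by name: the statement is the Claim_ definition above) =====
theorem make_marker_color_spec : Claim_equal_make_marker_color := by
  intro samples _
  unfold Spec_make_marker_color make_marker_color
  rw [alt_eq_foldl, loop_green]
  simp [pvPred, List.all_map, List.any_map, Function.comp]
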